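-- pv_equiv track=rewrite | github.com/rishovnag/wordle-solver | wordle_helper_gui.py | _check_word_for_duplicates
-- ===== SOURCE A (Python) =====
-- from collections import Counter
--
-- def _check_word_for_duplicates(word: str) -> int:
--     freq = Counter(word)
--     pairs = sum(1 for v in freq.values() if v == 2)
--     triples = sum(1 for v in freq.values() if v == 3)
--
--     if pairs == 1 and triples == 1:
--         return 4
--     if pairs == 2:
--         return 3
--     if triples == 1:
--         return 2
--     if pairs == 1:
--         return 1
--     return 0
-- ===== SOURCE B (Python) =====
-- def _check_word_for_duplicates(word: str) -> int:
--     # sort the letters and scan consecutive runs instead of building a Counter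
--     pairs = 0
--     triples = 0
--     run = 0
--     prev = None
--     for ch in sorted(word):
--         if prev == ch:
--             run += 1
--         else:
--             if run == 2:
--                 pairs += 1
--             elif run == 3:
--                 triples += 1
--             prev = ch
--             run = 1
--     if run == 2:
--         pairs += 1
--     elif run == 3:
--         triples += 1
--
--     if pairs == 1 and triples == 1:
--         return 4
--     if pairs == 2:
--         return 3
--     if triples == 1:
--         return 2
--     if pairs == 1:
--         return 1
--     return 0
-- ===== Notes on version B (the rewrite author's own statement) =====
-- stated objective: alternative
-- what changed: B drops the Counter hash table entirely: it sorts the word and counts pair/triple runs of identical letters in a single scan over the sorted sequence, keeping the same final branch cascade.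
import Mathlib
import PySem

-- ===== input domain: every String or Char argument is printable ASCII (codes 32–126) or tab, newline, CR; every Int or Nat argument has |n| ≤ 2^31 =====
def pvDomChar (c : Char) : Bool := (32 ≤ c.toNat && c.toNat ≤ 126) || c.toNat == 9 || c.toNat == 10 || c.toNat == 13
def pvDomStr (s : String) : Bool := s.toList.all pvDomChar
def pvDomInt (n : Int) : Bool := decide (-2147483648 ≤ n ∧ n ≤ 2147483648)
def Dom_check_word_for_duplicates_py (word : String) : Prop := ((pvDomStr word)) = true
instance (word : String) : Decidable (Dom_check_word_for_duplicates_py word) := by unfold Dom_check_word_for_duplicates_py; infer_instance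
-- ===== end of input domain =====

-- B replaces A's Counter hash table by a scan of sorted(word) counting consecutive-run
-- lengths in one pass (objective: alternative representation, same final branch cascade).

-- ===== PORT A =====
def check_word_for_duplicates_py (word : String) : Int :=
  let freq := PySem.Dict.counter word.toList
  let pairs : Int := freq.values.foldl (fun acc v => if v = 2 then acc + 1 else acc) 0
  let triples : Int := freq.values.foldl (fun acc v => if v = 3 then acc + 1 else acc) 0
  if pairs = 1 ∧ triples = 1 then 4
  else if pairs = 2 then 3
  else if triples = 1 then 2
  else if pairs = 1 then 1
  else 0

-- ===== PORT B =====
-- close a finished run: 'if run == 2: pairs += 1 elif run == 3: triples += 1'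
def pvClose (p t run : Int) : Int × Int :=
  if run = 2 then (p + 1, t) else if run = 3 then (p, t + 1) else (p, t)

-- loop body of B's single 'for ch in sorted(word)' pass; state = (pairs, triples, run, prev)
def pvStep (s : Int × Int × Int × Option Char) (ch : Char) : Int × Int × Int × Option Char :=
  if s.2.2.2 = some ch then (s.1, s.2.1, s.2.2.1 + 1, s.2.2.2)
  else
    let pt := pvClose s.1 s.2.1 s.2.2.1
    (pt.1, pt.2, 1, some ch)

def check_word_for_duplicates_py_alt (word : String) : Int :=
  let s := (PySem.List.sorted word.toList (fun x => x) false).foldl pvStep (0, 0, 0, none)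
  let pt := pvClose s.1 s.2.1 s.2.2.1
  let pairs := pt.1
  let triples := pt.2
  if pairs = 1 ∧ triples = 1 then 4
  else if pairs = 2 then 3
  else if triples = 1 then 2
  else if pairs = 1 then 1
  else 0

-- ===== PRECONDITION & SPEC =====
def Spec_check_word_for_duplicates_py (word : String) (out : Int) : Prop := out = check_word_for_duplicates_py_alt word
instance (word : String) (out : Int) : Decidable (Spec_check_word_for_duplicates_py word out) := by unfold Spec_check_word_for_duplicates_py; infer_instance

-- ===== CLAIM (what is proved, stated in full; the proofs are below) =====
def Claim_equal_check_word_for_duplicates_py : Prop := ∀ (word : String), Dom_check_word_for_duplicates_py word → Spec_check_word_for_duplicates_py word (check_word_for_duplicates_py word)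

-- ===== LEMMAS AND PROOFS =====

-- number of distinct characters of l occurring exactly k times
def cntk (l : List Char) (k : Nat) : Nat :=
  (l.toFinset.filter (fun c => l.count c = k)).card

lemma cntk_perm {l₁ l₂ : List Char} (h : l₁.Perm l₂) (k : Nat) : cntk l₁ k = cntk l₂ k := by
  unfold cntk
  have ht : l₁.toFinset = l₂.toFinset := by ext x; simp [h.mem_iff]
  rw [ht]
  congr 1
  apply Finset.filter_congr
  intro x _
  simp [h.count_eq]

lemma cntk_nil (k : Nat) : cntk [] k = 0 := by simp [cntk]

lemma cntk_cons (c : Char) (rest : List Char) (k : Nat) :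
    cntk (c :: rest) k =
      (if rest.count c + 1 = k then 1 else 0) + cntk (rest.filter (fun x => !(x == c))) k := by
  classical
  unfold cntk
  have hins : (c :: rest).toFinset = insert c (rest.toFinset.erase c) := by
    ext x; by_cases hx : x = c <;> simp [hx]
  rw [hins, Finset.filter_insert]
  have hT : rest.toFinset.erase c = (rest.filter (fun x => !(x == c))).toFinset := by
    ext x
    simp only [Finset.mem_erase, List.mem_toFinset, List.mem_filter, Bool.not_eq_eq_eq_not,
      Bool.not_true, beq_eq_false_iff_ne, ne_eq]
    tauto
  have hfil : (rest.toFinset.erase c).filter (fun d => (c :: rest).count d = k)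
      = ((rest.filter (fun x => !(x == c))).toFinset).filter
          (fun d => (rest.filter (fun x => !(x == c))).count d = k) := by
    rw [← hT]
    apply Finset.filter_congr
    intro x hx
    have hxc : x ≠ c := (Finset.mem_erase.mp hx).1
    simp [List.count_filter, hxc, Ne.symm hxc]
  have hpc : ((c :: rest).count c = k) ↔ (rest.count c + 1 = k) := by
    simp
  have hnm : c ∉ (rest.toFinset.erase c).filter (fun d => (c :: rest).count d = k) := by
    simp
  split_ifs with h1 h2 h2
  · rw [Finset.card_insert_of_notMem hnm, hfil]; omega
  · exact absurd (hpc.mp h1) h2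
  · exact absurd (hpc.mpr h2) h1
  · rw [hfil]; omega

lemma pvClose_eq (p t n : Int) :
    pvClose p t n = (p + (if n = 2 then 1 else 0), t + (if n = 3 then 1 else 0)) := by
  unfold pvClose; split_ifs <;> simp_all

lemma main_some : ∀ (l : List Char) (a : Char), l.Pairwise (· ≤ ·) → (∀ x ∈ l, a ≤ x) →
    ∀ (p t run : Int),
    (fun s : Int × Int × Int × Option Char => pvClose s.1 s.2.1 s.2.2.1)
        (l.foldl pvStep (p, t, run, some a)) =
      ((pvClose p t (run + l.count a)).1 + (cntk (l.filter (fun x => !(x == a))) 2 : Int),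
       (pvClose p t (run + l.count a)).2 + (cntk (l.filter (fun x => !(x == a))) 3 : Int)) := by
  intro l
  induction l with
  | nil =>
    intro a _ _ p t run
    simp [cntk_nil]
  | cons c rest ih =>
    intro a hpw hle p t run
    rw [List.pairwise_cons] at hpw
    obtain ⟨hcr, hpw⟩ := hpw
    by_cases hca : c = a
    · subst hca
      have hstep : pvStep (p, t, run, some c) c = (p, t, run + 1, some c) := by
        simp [pvStep]
      rw [List.foldl_cons, hstep, ih c hpw hcr p t (run + 1)]
      have hcnt : run + 1 + ((rest.count c : Nat) : Int) = run + (((c :: rest).count c : Nat) : Int) := by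
        rw [List.count_cons_self]; push_cast; ring
      have hflt : (c :: rest).filter (fun x => !(x == c)) = rest.filter (fun x => !(x == c)) := by
        simp
      rw [hcnt, hflt]
    · have hac : a ≤ c := hle c List.mem_cons_self
      have hanr : a ∉ rest := by
        intro hmem
        exact hca (le_antisymm (hcr a hmem) hac)
      have hstep : pvStep (p, t, run, some a) c
          = ((pvClose p t run).1, (pvClose p t run).2, 1, some c) := by
        simp only [pvStep]
        rw [if_neg]
        simp only [Option.some.injEq]
        exact fun h => hca h.symm
      rw [List.foldl_cons, hstep, ih c hpw hcr (pvClose p t run).1 (pvClose p t run).2 1]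
      have hcnt0 : (c :: rest).count a = 0 := by
        rw [List.count_eq_zero]
        intro hmem
        rcases List.mem_cons.mp hmem with h | h
        · exact hca h.symm
        · exact hanr h
      have hflt : (c :: rest).filter (fun x => !(x == a)) = c :: rest := by
        rw [List.filter_eq_self]
        intro x hx
        rcases List.mem_cons.mp hx with h | h
        · subst h; simp [hca]
        · simp; intro he; exact hanr (he ▸ h)
      rw [hcnt0, hflt, cntk_cons c rest 2, cntk_cons c rest 3]
      rw [pvClose_eq (pvClose p t run).1 (pvClose p t run).2 (1 + (rest.count c : Int))]
      simp only [Nat.cast_zero, add_zero, Prod.mk.injEq]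
      refine ⟨?_, ?_⟩ <;> (push_cast; split_ifs <;> omega)

lemma countP_nodup_eq_card (l : List Char) (h : l.Nodup) (p : Char → Bool) :
    l.countP p = (l.toFinset.filter (fun c => p c = true)).card := by
  classical
  rw [List.countP_eq_length_filter, ← List.toFinset_card_of_nodup (h.filter p),
    List.toFinset_filter]

lemma pairs_eq (xs : List Char) (k : Nat) (ki : Int) (hk : (k : Int) = ki) :
    (PySem.Dict.counter xs).values.foldl (fun acc v => if v = ki then acc + 1 else acc) 0
      = (cntk xs k : Int) := by
  classical
  have hv : (PySem.Dict.counter xs).values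
      = (PySem.Set.ofList xs).map (fun c => ((xs.count c : Nat) : Int)) := by
    show ((PySem.Dict.counter xs).items).map Prod.snd = _
    rw [PySem.Dict.items_counter, List.map_map]
    rfl
  rw [hv, PySem.List.foldl_ite_add_one]
  rw [List.countP_map]
  have hp : ((fun v : Int => decide (v = ki)) ∘ (fun c : Char => ((xs.count c : Nat) : Int)))
      = fun c : Char => decide (xs.count c = k) := by
    funext c
    simp only [Function.comp]
    congr 1
    rw [← hk]
    simp
  rw [hp]
  have hnd : (PySem.Set.ofList xs).Nodup := PySem.Set.nodup_ofList xs
  rw [countP_nodup_eq_card _ hnd]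
  have hfs : (PySem.Set.ofList xs).toFinset = xs.toFinset := by
    ext x; simp [PySem.Set.mem_ofList]
  have : ((PySem.Set.ofList xs).toFinset.filter (fun c => decide (xs.count c = k) = true))
      = xs.toFinset.filter (fun c => xs.count c = k) := by
    rw [hfs]; apply Finset.filter_congr; intro x _; simp
  rw [this]
  simp [cntk]

lemma alt_eq_cnt (xs : List Char) :
    (fun s : Int × Int × Int × Option Char => pvClose s.1 s.2.1 s.2.2.1)
        ((PySem.List.sorted xs (fun x => x) false).foldl pvStep (0, 0, 0, none)) =
      ((cntk xs 2 : Int), (cntk xs 3 : Int)) := by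
  have hperm : (PySem.List.sorted xs (fun x => x) false).Perm xs :=
    PySem.List.sorted_perm xs (fun x => x) false
  rw [← cntk_perm hperm 2, ← cntk_perm hperm 3]
  have hpw : (PySem.List.sorted xs (fun x => x) false).Pairwise (· ≤ ·) :=
    PySem.List.sorted_pairwise xs (fun x => x)
  cases hs : PySem.List.sorted xs (fun x => x) false with
  | nil => simp [pvClose, cntk_nil]
  | cons c rest =>
    rw [hs] at hpw
    rw [List.pairwise_cons] at hpw
    obtain ⟨hcr, hpw⟩ := hpw
    have hstep : pvStep (0, 0, 0, none) c = (0, 0, 1, some c) := by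
      simp [pvStep, pvClose]
    rw [List.foldl_cons, hstep, main_some rest c hpw hcr 0 0 1]
    rw [cntk_cons c rest 2, cntk_cons c rest 3]
    rw [pvClose_eq 0 0 (1 + (rest.count c : Int))]
    simp only [Prod.mk.injEq]
    refine ⟨?_, ?_⟩ <;> (push_cast; split_ifs <;> omega)

-- the shared final branch cascade
def pvCascade (pairs triples : Int) : Int :=
  if pairs = 1 ∧ triples = 1 then 4
  else if pairs = 2 then 3
  else if triples = 1 then 2
  else if pairs = 1 then 1
  else 0

lemma A_eq (word : String) :
    check_word_for_duplicates_py word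
      = pvCascade (cntk word.toList 2 : Int) (cntk word.toList 3 : Int) := by
  unfold check_word_for_duplicates_py pvCascade
  simp only [pairs_eq word.toList 2 2 (by norm_num : ((2 : Nat) : Int) = 2),
    pairs_eq word.toList 3 3 (by norm_num : ((3 : Nat) : Int) = 3)]

lemma B_eq (word : String) :
    check_word_for_duplicates_py_alt word
      = pvCascade (cntk word.toList 2 : Int) (cntk word.toList 3 : Int) := by
  unfold check_word_for_duplicates_py_alt pvCascade
  have h := alt_eq_cnt word.toList
  simp only at h
  simp only [h]

-- ===== VERDICT (by name: the statement is the Claim_ definition above) =====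
theorem check_word_for_duplicates_py_spec : Claim_equal_check_word_for_duplicates_py := by
  intro word _
  unfold Spec_check_word_for_duplicates_py
  rw [A_eq, B_eq]
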